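-- pv_equiv track=rewrite | github.com/usernamelzr/cipher-auto-search-tool | cipher-auto-search-tool/src/util.py | inner_product
-- ===== SOURCE A (Python) =====
-- def inner_product(a, b, length):
--     c = a & b
--     res = 0
--     for i in range(length):
--         res = res ^ c
--         c = c >> 1
--     res = res & 1
--     return res
-- ===== SOURCE B (Python) =====
-- def inner_product(a, b, length):
--     if length <= 0:
--         return 0
--     x = (a & b) & ((1 << length) - 1)
--     shift = 1
--     while shift < length:
--         x ^= x >> shift
--         shift <<= 1
--     return x & 1
-- ===== Notes on version B (the rewrite author's own statement) =====
-- stated objective: faster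
-- what changed: Instead of XOR-ing the whole word and shifting it bit by bit for `length` iterations, B masks a&b to its low `length` bits once and folds the parity into bit 0 with O(log length) xor-shift doubling steps.
import Mathlib
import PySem

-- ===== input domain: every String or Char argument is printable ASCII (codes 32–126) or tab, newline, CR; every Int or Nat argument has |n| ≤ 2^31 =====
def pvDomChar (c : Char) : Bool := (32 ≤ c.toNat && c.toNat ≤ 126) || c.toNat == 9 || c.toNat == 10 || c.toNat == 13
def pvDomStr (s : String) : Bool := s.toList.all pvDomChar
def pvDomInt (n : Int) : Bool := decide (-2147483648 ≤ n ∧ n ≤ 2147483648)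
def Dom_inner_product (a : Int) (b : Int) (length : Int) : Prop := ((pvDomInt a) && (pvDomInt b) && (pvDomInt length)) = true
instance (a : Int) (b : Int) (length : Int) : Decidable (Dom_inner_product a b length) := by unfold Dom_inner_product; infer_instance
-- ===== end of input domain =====

-- B replaces A's per-bit linear scan by masking a&b to the low `length` bits and
-- folding the parity into bit 0 with O(log length) xor-shift doubling steps (alternative algorithm).


-- ===== PORT A =====
-- c = a & b; res = 0; for i in range(length): res ^= c; c >>= 1; return res & 1
def inner_product (a : Int) (b : Int) (length : Int) : Int :=
  let c := PySem.Int.band a b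
  let st := (List.range length.toNat).foldl
    (fun (s : Int × Int) _ => (PySem.Int.bxor s.1 s.2, s.2 >>> (1 : Nat))) (0, c)
  PySem.Int.band st.1 1

-- ===== PORT B =====
-- while shift < length: x ^= x >> shift; shift <<= 1
-- (the `1 ≤ shift` conjunct is a totality guard only: every call has shift ≥ 1)
def ipLoop (x : Int) (shift : Int) (length : Int) : Int :=
  if hg : 1 ≤ shift ∧ shift < length then
    ipLoop (PySem.Int.bxor x (x >>> shift.toNat)) (shift <<< (1 : Nat)) length
  else x
termination_by (length - shift).toNat
decreasing_by
  simp only [Int.shiftLeft_eq]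
  omega

def inner_product_alt (a : Int) (b : Int) (length : Int) : Int :=
  if length ≤ 0 then 0
  else
    let x := PySem.Int.band (PySem.Int.band a b) (((1 : Int) <<< length.toNat) - 1)
    PySem.Int.band (ipLoop x 1 length) 1

-- ===== PRECONDITION & SPEC =====
def Spec_inner_product (a : Int) (b : Int) (length : Int) (out : Int) : Prop := out = inner_product_alt a b length
instance (a : Int) (b : Int) (length : Int) (out : Int) : Decidable (Spec_inner_product a b length out) := by unfold Spec_inner_product; infer_instance

-- ===== CLAIM (what is proved, stated in full; the proofs are below) =====
def Claim_equal_inner_product : Prop := ∀ (a : Int) (b : Int) (length : Int), Dom_inner_product a b length → Spec_inner_product a b length (inner_product a b length)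

-- ===== LEMMAS AND PROOFS =====

-- bit 0 of an Int, Python-style (z % 2 with floor mod)
def b0 (z : Int) : Bool := decide (PySem.Int.mod z 2 = 1)

def toI (b : Bool) : Int := if b then 1 else 0

-- parity of the low k bits of c (A's quantity)
def pL : Int → Nat → Bool
  | _, 0 => false
  | c, k+1 => b0 c ^^ pL (c >>> (1 : Nat)) k

lemma shr_lt (x s : Nat) (h0 : 0 < x) (hs : 0 < s) : x >>> s < x := by
  rw [Nat.shiftRight_eq_div_pow]
  exact Nat.div_lt_self h0 (Nat.one_lt_two_pow_iff.mpr (by omega))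

-- parity of the bits of n at indices that are multiples of s (B's loop invariant)
def G (n : Nat) (s : Nat) : Bool :=
  if h : 0 < n ∧ 0 < s then n.testBit 0 ^^ G (n >>> s) s else n.testBit 0
termination_by n
decreasing_by exact shr_lt n s h.1 h.2

lemma G_zero (s : Nat) : G 0 s = false := by
  unfold G; simp

lemma G_unfold (m s : Nat) (hs : 0 < s) : G m s = (m.testBit 0 ^^ G (m >>> s) s) := by
  by_cases hm : 0 < m
  · rw [G, dif_pos ⟨hm, hs⟩]
  · have : m = 0 := by omega
    subst this
    simp [G_zero, Nat.shiftRight_eq_div_pow]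

lemma G_small (n s : Nat) (hs : 0 < s) (h : n < 2 ^ s) : G n s = n.testBit 0 := by
  rw [G_unfold n s hs]
  have : n >>> s = 0 := by
    rw [Nat.shiftRight_eq_div_pow]; exact Nat.div_eq_of_lt h
  rw [this, G_zero]
  simp

lemma natXorMod (p q : Nat) : (p ^^^ q) % 2 = (p % 2) ^^^ (q % 2) := by
  rw [← Nat.and_one_is_mod, ← Nat.and_one_is_mod, ← Nat.and_one_is_mod,
    Nat.and_xor_distrib_right]

lemma b0_natCast (n : Nat) : b0 (Int.ofNat n) = decide (n % 2 = 1) := by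
  have h : PySem.Int.mod (Int.ofNat n) 2 = ((n % 2 : Nat) : Int) := by
    exact_mod_cast PySem.Int.mod_natCast n 2
  simp [b0, h]
  omega

lemma b0_neg_form (X : Nat) : b0 (-(X : Int) - 1) = !decide (X % 2 = 1) := by
  have h : PySem.Int.mod (-(X : Int) - 1) 2 = (-(X : Int) - 1) % 2 :=
    PySem.Int.mod_eq_emod_of_pos (by norm_num)
  have h2 : ((-(X : Int) - 1) % 2) = 1 - ((X % 2 : Nat) : Int) := by omega
  rcases Nat.mod_two_eq_zero_or_one X with hX | hX <;>
    simp [b0, h, h2, hX]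

lemma b0_negSucc (m : Nat) : b0 (Int.negSucc m) = !decide (m % 2 = 1) := by
  have h : Int.negSucc m = -(m : Int) - 1 := by omega
  rw [h, b0_neg_form]

lemma b0_natCast' (n : Nat) : b0 ((n : Int)) = decide (n % 2 = 1) := b0_natCast n

lemma b0_xor_nat (p q : Nat) :
    decide ((p ^^^ q) % 2 = 1) = (decide (p % 2 = 1) ^^ decide (q % 2 = 1)) := by
  rw [natXorMod]
  rcases Nat.mod_two_eq_zero_or_one p with hp | hp <;>
    rcases Nat.mod_two_eq_zero_or_one q with hq | hq <;> rw [hp, hq] <;> decide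

lemma E1 (r c : Int) : b0 (PySem.Int.bxor r c) = (b0 r ^^ b0 c) := by
  rcases r with n | n <;> rcases c with m | m <;> rw [PySem.Int.bxor]
  · rw [if_pos (by exact Int.natCast_nonneg n), if_pos (by exact Int.natCast_nonneg m)]
    rw [show ((Int.ofNat n).toNat = n) from rfl, show ((Int.ofNat m).toNat = m) from rfl]
    rw [show (b0 ↑(n ^^^ m) = decide ((n ^^^ m) % 2 = 1)) from b0_natCast _,
      b0_natCast n, b0_natCast m, b0_xor_nat]
  · rw [if_pos (by exact Int.natCast_nonneg n), if_neg (by omega)]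
    rw [show ((Int.ofNat n).toNat = n) from rfl,
      show ((-Int.negSucc m - 1).toNat = m) by simp [Int.negSucc_eq]]
    rw [b0_neg_form, b0_natCast n, b0_negSucc m, b0_xor_nat]
    cases decide (n % 2 = 1) <;> cases decide (m % 2 = 1) <;> rfl
  · rw [if_neg (by omega), if_pos (by exact Int.natCast_nonneg m)]
    rw [show ((-Int.negSucc n - 1).toNat = n) by simp [Int.negSucc_eq],
      show ((Int.ofNat m).toNat = m) from rfl]
    rw [b0_neg_form, b0_negSucc n, b0_natCast m, b0_xor_nat]
    cases decide (n % 2 = 1) <;> cases decide (m % 2 = 1) <;> rfl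
  · rw [if_neg (by omega), if_neg (by omega)]
    rw [show ((-Int.negSucc n - 1).toNat = n) by simp [Int.negSucc_eq],
      show ((-Int.negSucc m - 1).toNat = m) by simp [Int.negSucc_eq]]
    rw [show (b0 ↑(n ^^^ m) = decide ((n ^^^ m) % 2 = 1)) from b0_natCast _,
      b0_negSucc n, b0_negSucc m, b0_xor_nat]
    cases decide (n % 2 = 1) <;> cases decide (m % 2 = 1) <;> rfl

lemma band_one_toI (z : Int) : PySem.Int.band z 1 = toI (b0 z) := by
  rw [PySem.Int.band_one, show b0 z = decide (PySem.Int.mod z 2 = 1) from rfl]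
  rcases PySem.Int.mod_two_eq z with h | h <;> rw [h] <;> rfl

-- A's fold, characterised: bit 0 of the accumulated xor is b0 r ^^ parity of low bits of c
lemma foldA (l : List Nat) : ∀ (r c : Int),
    PySem.Int.band ((l.foldl
      (fun (s : Int × Int) _ => (PySem.Int.bxor s.1 s.2, s.2 >>> (1 : Nat))) (r, c)).1) 1
      = toI (b0 r ^^ pL c l.length) := by
  induction l with
  | nil => intro r c; simp [pL, band_one_toI]
  | cons a l ih =>
    intro r c
    rw [List.foldl_cons, ih]
    show toI (b0 (PySem.Int.bxor r c) ^^ pL (c >>> (1 : Nat)) l.length) = _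
    rw [E1, Bool.xor_assoc]
    rfl

-- masking lemmas for PySem.Int.band with 2^k - 1
lemma bandMaskOfNat (n k : Nat) :
    PySem.Int.band (Int.ofNat n) ((2 : Int) ^ k - 1) = ((n % 2 ^ k : Nat) : Int) := by
  have hp : ((2 : Int) ^ k - 1) = ((2 ^ k - 1 : Nat) : Int) := by
    push_cast [Nat.one_le_two_pow]; ring
  rw [PySem.Int.band, if_pos (by exact Int.natCast_nonneg n), hp,
    if_pos (by positivity), Int.toNat_natCast]
  simp [Nat.and_two_pow_sub_one_eq_mod]

lemma bandMaskNegSucc (m k : Nat) :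
    PySem.Int.band (Int.negSucc m) ((2 : Int) ^ k - 1)
      = ((2 ^ k - 1 - m % 2 ^ k : Nat) : Int) := by
  have h1 : ¬ ((0 : Int) ≤ Int.negSucc m) := by omega
  have hp : ((2 : Int) ^ k - 1) = ((2 ^ k - 1 : Nat) : Int) := by
    push_cast [Nat.one_le_two_pow]; ring
  have hneg : (-(Int.negSucc m) - 1).toNat = m := by simp [Int.negSucc_eq]
  rw [PySem.Int.band, if_neg h1, hp, if_pos (by positivity), hneg, Int.toNat_natCast]
  rw [Nat.and_comm, Nat.and_two_pow_sub_one_eq_mod]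

lemma modPowShift (n L : Nat) : (n % 2 ^ (L + 1)) >>> 1 = (n >>> 1) % 2 ^ L := by
  apply Nat.eq_of_testBit_eq
  intro i
  rw [Nat.testBit_shiftRight, Nat.testBit_mod_two_pow, Nat.testBit_mod_two_pow,
    Nat.testBit_shiftRight]
  have h : (1 + i < L + 1) ↔ (i < L) := by omega
  simp [h]

lemma testBit0_mod (n k : Nat) (hk : 0 < k) : (n % 2 ^ k).testBit 0 = n.testBit 0 := by
  rw [Nat.testBit_mod_two_pow]
  simp [hk]

-- bridge: parity of the low L bits of c  =  full bit-parity of (c & (2^L - 1))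
lemma M : ∀ (L : Nat) (c : Int),
    pL c L = G ((PySem.Int.band c ((2 : Int) ^ L - 1)).toNat) 1 := by
  intro L
  induction L with
  | zero =>
    intro c
    have : ((2 : Int) ^ 0 - 1) = 0 := by norm_num
    rw [this, PySem.Int.band_zero]
    simp [pL, G_zero]
  | succ L ih =>
    intro c
    rcases c with n | m
    · rw [bandMaskOfNat n (L + 1), Int.toNat_natCast]
      rw [show pL (Int.ofNat n) (L+1) = (b0 (Int.ofNat n) ^^ pL ((Int.ofNat n) >>> (1 : Nat)) L) from rfl]
      have hshr : (Int.ofNat n) >>> (1 : Nat) = Int.ofNat (n >>> 1) := rfl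
      rw [hshr, ih, bandMaskOfNat (n >>> 1) L, Int.toNat_natCast]
      rw [G_unfold (n % 2 ^ (L + 1)) 1 (by norm_num), modPowShift]
      congr 1
      rw [b0_natCast, testBit0_mod n (L + 1) (by omega)]
      simp [Nat.testBit_zero]
    · rw [bandMaskNegSucc m (L + 1), Int.toNat_natCast]
      rw [show pL (Int.negSucc m) (L+1) = (b0 (Int.negSucc m) ^^ pL ((Int.negSucc m) >>> (1 : Nat)) L) from rfl]
      have hshr : (Int.negSucc m) >>> (1 : Nat) = Int.negSucc (m >>> 1) := rfl
      rw [hshr, ih, bandMaskNegSucc (m >>> 1) L, Int.toNat_natCast]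
      rw [G_unfold (2 ^ (L + 1) - 1 - m % 2 ^ (L + 1)) 1 (by norm_num)]
      have hKpos : 0 < 2 ^ L := Nat.two_pow_pos L
      have hm2 : m % 2 ^ (L + 1) = 2 * ((m / 2) % 2 ^ L) + m % 2 := by
        have h1 : m = (2 * 2 ^ L) * (m / 2 / 2 ^ L) + (2 * ((m / 2) % 2 ^ L) + m % 2) := by
          have e1 := Nat.div_add_mod m 2
          have e2 := Nat.div_add_mod (m / 2) (2 ^ L)
          calc m = 2 * (m / 2) + m % 2 := by omega
            _ = 2 * (2 ^ L * (m / 2 / 2 ^ L) + (m / 2) % 2 ^ L) + m % 2 := by rw [e2]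
            _ = (2 * 2 ^ L) * (m / 2 / 2 ^ L) + (2 * ((m / 2) % 2 ^ L) + m % 2) := by ring
        have hlt : 2 * ((m / 2) % 2 ^ L) + m % 2 < 2 * 2 ^ L := by
          have := Nat.mod_lt (m / 2) hKpos
          omega
        calc m % 2 ^ (L + 1) = m % (2 * 2 ^ L) := by rw [pow_succ]; ring_nf
          _ = (2 * ((m / 2) % 2 ^ L) + m % 2 + (2 * 2 ^ L) * (m / 2 / 2 ^ L)) % (2 * 2 ^ L) := by
              conv_lhs => rw [h1]
              ring_nf
          _ = (2 * ((m / 2) % 2 ^ L) + m % 2) % (2 * 2 ^ L) := by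
              rw [Nat.add_mul_mod_self_left]
          _ = 2 * ((m / 2) % 2 ^ L) + m % 2 := Nat.mod_eq_of_lt hlt
      have hpow : 2 ^ (L + 1) = 2 * 2 ^ L := by rw [pow_succ]; ring
      set t := (m / 2) % 2 ^ L with ht
      have htlt : t < 2 ^ L := Nat.mod_lt (m / 2) hKpos
      have hC : 2 ^ (L + 1) - 1 - m % 2 ^ (L + 1) = 2 * (2 ^ L - 1 - t) + (1 - m % 2) := by
        omega
      have hshr2 : (2 ^ (L + 1) - 1 - m % 2 ^ (L + 1)) >>> 1 = 2 ^ L - 1 - t := by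
        rw [Nat.shiftRight_eq_div_pow, pow_one, hC]
        omega
      have hm2' : (m >>> 1) % 2 ^ L = t := by rw [Nat.shiftRight_eq_div_pow, pow_one]
      rw [hshr2, hm2']
      congr 1
      rw [b0_negSucc]
      rw [hC]
      rcases Nat.mod_two_eq_zero_or_one m with hm | hm
      · simp [Nat.testBit_zero, hm]
      · simp [Nat.testBit_zero, hm]

-- xor-shift step preserves the multiple-of-s bit parity (the doubling invariant)
lemma G_xor_shift : ∀ (n : Nat), ∀ (s : Nat), 0 < s →
    G (n ^^^ (n >>> s)) (2 * s) = G n s := by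
  intro n
  induction n using Nat.strong_induction_on with
  | _ n IH =>
    intro s hs
    by_cases hn : n = 0
    · subst hn
      simp [G_zero, Nat.shiftRight_eq_div_pow]
    · have hnpos : 0 < n := by omega
      have h2s : 0 < 2 * s := by omega
      have hy : n >>> (2 * s) < n := shr_lt n (2 * s) hnpos h2s
      have hsh : (n ^^^ (n >>> s)) >>> (2 * s) = (n >>> (2 * s)) ^^^ ((n >>> (2 * s)) >>> s) := by
        apply Nat.eq_of_testBit_eq
        intro i
        rw [Nat.testBit_shiftRight, Nat.testBit_xor, Nat.testBit_xor,
          Nat.testBit_shiftRight, Nat.testBit_shiftRight, Nat.testBit_shiftRight,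
          Nat.testBit_shiftRight]
        congr 2
        omega
      rw [G_unfold (n ^^^ (n >>> s)) (2 * s) h2s, hsh,
        IH (n >>> (2 * s)) hy s hs]
      rw [G_unfold n s hs, G_unfold (n >>> s) s hs]
      have ha : (n ^^^ n >>> s).testBit 0 = (n.testBit 0 ^^ (n >>> s).testBit 0) :=
        Nat.testBit_xor n (n >>> s) 0
      have hb : (n >>> s) >>> s = n >>> (2 * s) := by
        rw [← Nat.shiftRight_add]
        congr 1
        omega
      rw [ha, hb, Bool.xor_assoc]

lemma int_shr_natCast (n : Nat) (k : Nat) : ((n : Int) >>> k) = ((n >>> k : Nat) : Int) := by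
  simp

-- B's loop computes toI (G n shift.toNat) for masked nonnegative input
lemma ipLoop_bit0 (s L : Int) (n : Nat) (hs : 1 ≤ s) (hb : n < 2 ^ L.toNat) :
    PySem.Int.band (ipLoop (n : Int) s L) 1 = toI (G n s.toNat) := by
  by_cases h : s < L
  · rw [ipLoop, dif_pos ⟨hs, h⟩]
    rw [int_shr_natCast, PySem.Int.bxor_natCast]
    have hshl : s <<< (1 : Nat) = 2 * s := by
      simp [Int.shiftLeft_eq]; ring
    have hbound : n ^^^ (n >>> s.toNat) < 2 ^ L.toNat := by
      apply Nat.xor_lt_two_pow hb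
      calc n >>> s.toNat ≤ n := Nat.shiftRight_le n s.toNat
        _ < 2 ^ L.toNat := hb
    rw [hshl, ipLoop_bit0 (2 * s) L (n ^^^ (n >>> s.toNat)) (by omega) hbound]
    have h2 : (2 * s).toNat = 2 * s.toNat := by omega
    rw [h2, G_xor_shift n s.toNat (by omega)]
  · rw [ipLoop, dif_neg (by omega)]
    have hLs : (2 : Nat) ^ L.toNat ≤ 2 ^ s.toNat := by
      apply Nat.pow_le_pow_right (by norm_num)
      omega
    rw [G_small n s.toNat (by omega) (by omega), band_one_toI, b0_natCast']
    congr 1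
    simp [Nat.testBit_zero]
termination_by (L - s).toNat
decreasing_by omega

lemma b0_zero : b0 0 = false := by decide

-- A computes toI (pL (a & b) length.toNat)
lemma A_char (a b length : Int) :
    inner_product a b length = toI (pL (PySem.Int.band a b) length.toNat) := by
  show PySem.Int.band _ 1 = _
  rw [foldA]
  rw [List.length_range, b0_zero]
  simp

-- ===== VERDICT (by name: the statement is the Claim_ definition above) =====
theorem inner_product_spec : Claim_equal_inner_product := by
  intro a b length _
  unfold Spec_inner_product
  rw [A_char]
  by_cases hL : length ≤ 0
  · rw [inner_product_alt, if_pos hL]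
    have : length.toNat = 0 := by omega
    rw [this]
    rfl
  · rw [inner_product_alt, if_neg hL]
    have hmask : ((1 : Int) <<< length.toNat) - 1 = (2 : Int) ^ length.toNat - 1 := by
      simp [Int.shiftLeft_eq]
    set c := PySem.Int.band a b with hc
    show toI (pL c length.toNat)
      = PySem.Int.band (ipLoop (PySem.Int.band c (((1 : Int) <<< length.toNat) - 1)) 1 length) 1
    rw [hmask]
    have hx : ∃ n0 : Nat, PySem.Int.band c ((2 : Int) ^ length.toNat - 1) = (n0 : Int)
        ∧ n0 < 2 ^ length.toNat := by
      rcases c with n | m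
      · exact ⟨n % 2 ^ length.toNat, bandMaskOfNat n length.toNat,
          Nat.mod_lt n (Nat.two_pow_pos _)⟩
      · refine ⟨2 ^ length.toNat - 1 - m % 2 ^ length.toNat,
          bandMaskNegSucc m length.toNat, ?_⟩
        have := Nat.two_pow_pos length.toNat
        omega
    obtain ⟨n0, hn0, hn0lt⟩ := hx
    rw [hn0, ipLoop_bit0 1 length n0 (by norm_num) hn0lt]
    rw [M length.toNat c, hn0, Int.toNat_natCast]
    rfl
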